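-- pv_equiv track=rewrite | github.com/admetaq/PL2023 | TPC1/menu.py | distribuicaoDoencaPFaixaEtaria
-- ===== SOURCE A (Python) =====
-- def distribuicaoDoencaPFaixaEtaria(dicionarioPacientes):
--     """
--     Conta a quantidade de pacientes doentes, separando por faixa etária.
--     Percorre os pacientes doentes no dicionário de pacientes recebido, calcula a sua faixa etária e incrementa
--     o seu valor no dicionário.
--
--     Args:
--         dicionarioPacientes : dict
--         Dicionário com os dados do csv.
--
--     Returns:
--         dicionarioDist : dict
--         Um dicionário com as faixas etárias como chaves e a quantidade de pacientes doentes em cada faixa como valores.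
--     """
--
--     dicionarioDist = dict()
--
--     for paciente in dicionarioPacientes[True]:
--         indice = int(paciente[0]/5)
--         chave = str(indice*5)+"-"+str((((indice+1)*5)-1))
--         if chave not in dicionarioDist:
--             dicionarioDist[chave] = 1
--         else:
--             dicionarioDist[chave]+=1
--
--     return dicionarioDist
-- ===== SOURCE B (Python) =====
-- def _faixa(paciente):
--     indice = int(paciente[0]/5)
--     return str(indice*5) + "-" + str(indice*5 + 4)
--
-- def _conta(chaves):
--     # recursive partitioning: count the first key's occurrences, drop them, recurse
--     if not chaves:
--         return []
--     c = chaves[0]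
--     iguais = [k for k in chaves if k == c]
--     resto = [k for k in chaves[1:] if k != c]
--     return [(c, len(iguais))] + _conta(resto)
--
-- def distribuicaoDoencaPFaixaEtaria(dicionarioPacientes):
--     return dict(_conta([_faixa(p) for p in dicionarioPacientes[True]]))
-- ===== Notes on version B (the rewrite author's own statement) =====
-- stated objective: alternative
-- what changed: Replaces A's single-pass dict counter with a recursive partitioning scheme: map patients to bracket keys, then repeatedly take the first remaining key, count its occurrences by filtering, remove them all, and recurse on the rest, assembling the association pairs back-to-front into a dict.
import Mathlib
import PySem

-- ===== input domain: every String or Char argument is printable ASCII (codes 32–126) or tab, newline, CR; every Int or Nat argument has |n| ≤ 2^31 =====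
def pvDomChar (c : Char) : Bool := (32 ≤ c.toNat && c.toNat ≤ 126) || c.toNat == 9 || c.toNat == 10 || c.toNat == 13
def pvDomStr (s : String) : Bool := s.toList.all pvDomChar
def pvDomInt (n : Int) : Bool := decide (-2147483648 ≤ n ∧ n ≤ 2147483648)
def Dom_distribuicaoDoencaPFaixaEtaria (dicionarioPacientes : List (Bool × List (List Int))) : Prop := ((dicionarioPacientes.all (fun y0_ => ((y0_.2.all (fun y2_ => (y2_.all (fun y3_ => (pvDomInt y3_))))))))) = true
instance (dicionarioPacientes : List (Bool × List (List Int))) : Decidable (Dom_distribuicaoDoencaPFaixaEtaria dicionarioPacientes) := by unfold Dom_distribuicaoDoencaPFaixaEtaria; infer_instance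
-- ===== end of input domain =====

-- B replaces A's single-pass dict-counter loop by a recursive partitioning scheme (map to
-- bracket keys, count-and-remove the first key, recurse); objective: alternative, no speed
-- claim. Equal on Pre_ (True key present, every patient record nonempty); elsewhere A raises.

-- ===== PORT A =====
-- 'int(paciente[0]/5)' is ported as truncating division Int.tdiv: for |age| ≤ 2^31 the float
-- quotient age/5 truncates exactly to the integer t-division (rounding cannot cross an integer).
-- 'paciente[0]' on an empty record raises IndexError in Python (excluded by Pre_); the port
-- uses a total '(pyGet? … 0).getD 0' there, which Pre_ makes unreachable.
def distribuicaoDoencaPFaixaEtaria (dicionarioPacientes : List (Bool × List (List Int))) : List (String × Int) :=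
  match (PySem.Dict.mk dicionarioPacientes).get? true with
  | none => []   -- Python raises KeyError here; excluded by Pre_
  | some pacientes =>
    (pacientes.foldl (fun dicionarioDist paciente =>
        let indice := Int.tdiv ((PySem.List.pyGet? paciente 0).getD 0) 5
        let chave := PySem.Int.toStr (indice * 5) ++ "-" ++ PySem.Int.toStr ((indice + 1) * 5 - 1)
        if dicionarioDist.contains chave = false then
          dicionarioDist.insert chave 1
        else
          dicionarioDist.insert chave (dicionarioDist.getD chave 0 + 1))
      PySem.Dict.empty).items

-- ===== PORT B =====
-- helper _faixa of Source B (same totalisation of paciente[0] as in port A)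
def pvFaixa (paciente : List Int) : String :=
  let indice := Int.tdiv ((PySem.List.pyGet? paciente 0).getD 0) 5
  PySem.Int.toStr (indice * 5) ++ "-" ++ PySem.Int.toStr (indice * 5 + 4)

-- helper _conta of Source B: recursive partitioning on the key list
def pvConta (chaves : List String) : List (String × Int) :=
  match chaves with
  | [] => []
  | c :: rest =>
    let iguais := (c :: rest).filter (fun k => k == c)
    let resto := rest.filter (fun k => k != c)
    [(c, (iguais.length : Int))] ++ pvConta resto
termination_by chaves.length
decreasing_by
  simp only [List.length_unattach, List.length_cons]
  exact Nat.lt_succ_of_le (le_trans (List.length_filter_le _ _) (by simp))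

-- 'dict(pairs)' on the nodup-keyed pairs _conta produces = PySem.Dict.mk pairs
def distribuicaoDoencaPFaixaEtaria_alt (dicionarioPacientes : List (Bool × List (List Int))) : List (String × Int) :=
  match (PySem.Dict.mk dicionarioPacientes).get? true with
  | none => []   -- Python raises KeyError here; excluded by Pre_
  | some pacientes =>
    (PySem.Dict.mk (pvConta (pacientes.map pvFaixa))).items

-- ===== PRECONDITION & SPEC =====
-- Pre_ excludes exactly the inputs where Python A raises: a missing True key (KeyError) and an
-- empty patient record (IndexError on paciente[0]).
def Pre_distribuicaoDoencaPFaixaEtaria (dicionarioPacientes : List (Bool × List (List Int))) : Prop :=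
  ((PySem.Dict.mk dicionarioPacientes).get? true).isSome = true ∧
  (((PySem.Dict.mk dicionarioPacientes).get? true).getD []).all (fun p => !p.isEmpty) = true
instance (dicionarioPacientes : List (Bool × List (List Int))) : Decidable (Pre_distribuicaoDoencaPFaixaEtaria dicionarioPacientes) := by unfold Pre_distribuicaoDoencaPFaixaEtaria; infer_instance

def pvWitness_distribuicaoDoencaPFaixaEtaria : (List (Bool × List (List Int))) :=
  [(true, [[3], [7, 1], [12], [3]]), (false, [])]

def Spec_distribuicaoDoencaPFaixaEtaria (dicionarioPacientes : List (Bool × List (List Int))) (out : List (String × Int)) : Prop := out = distribuicaoDoencaPFaixaEtaria_alt dicionarioPacientes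
instance (dicionarioPacientes : List (Bool × List (List Int))) (out : List (String × Int)) : Decidable (Spec_distribuicaoDoencaPFaixaEtaria dicionarioPacientes out) := by unfold Spec_distribuicaoDoencaPFaixaEtaria; infer_instance

-- ===== CLAIM (what is proved, stated in full; the proofs are below) =====
def Claim_equal_distribuicaoDoencaPFaixaEtaria : Prop := ∀ (dicionarioPacientes : List (Bool × List (List Int))), Dom_distribuicaoDoencaPFaixaEtaria dicionarioPacientes → Pre_distribuicaoDoencaPFaixaEtaria dicionarioPacientes → Spec_distribuicaoDoencaPFaixaEtaria dicionarioPacientes (distribuicaoDoencaPFaixaEtaria dicionarioPacientes)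

-- ===== LEMMAS AND PROOFS =====

-- A's loop body, branch by branch, is the canonical counter step keyed by pvFaixa.
theorem pvStep_eq (d : PySem.Dict String Int) (paciente : List Int) :
    (let indice := Int.tdiv ((PySem.List.pyGet? paciente 0).getD 0) 5
     let chave := PySem.Int.toStr (indice * 5) ++ "-" ++ PySem.Int.toStr ((indice + 1) * 5 - 1)
     if d.contains chave = false then d.insert chave 1
     else d.insert chave (d.getD chave 0 + 1)) =
    d.insert (pvFaixa paciente) (d.getD (pvFaixa paciente) 0 + 1) := by
  have hk : ∀ i : Int, (i + 1) * 5 - 1 = i * 5 + 4 := by intro i; ring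
  simp only [hk, pvFaixa]
  by_cases h : d.contains (PySem.Int.toStr (Int.tdiv ((PySem.List.pyGet? paciente 0).getD 0) 5 * 5) ++ "-" ++ PySem.Int.toStr (Int.tdiv ((PySem.List.pyGet? paciente 0).getD 0) 5 * 5 + 4)) = true
  · simp [h]
  · simp only [Bool.not_eq_true] at h
    simp [h, PySem.Dict.getD_of_not_contains _ _ h]

theorem pvFold_eq (pacientes : List (List Int)) (d : PySem.Dict String Int) :
    pacientes.foldl (fun dicionarioDist paciente =>
        let indice := Int.tdiv ((PySem.List.pyGet? paciente 0).getD 0) 5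
        let chave := PySem.Int.toStr (indice * 5) ++ "-" ++ PySem.Int.toStr ((indice + 1) * 5 - 1)
        if dicionarioDist.contains chave = false then dicionarioDist.insert chave 1
        else dicionarioDist.insert chave (dicionarioDist.getD chave 0 + 1)) d =
    pacientes.foldl (fun d p => d.insert (pvFaixa p) (d.getD (pvFaixa p) 0 + 1)) d := by
  induction pacientes generalizing d with
  | nil => rfl
  | cons p ps ih => simp only [List.foldl_cons, pvStep_eq]; try exact ih _

-- PySem.Set.ofList commutes with List.filter
theorem pvOfList_filter (p : String → Bool) (xs : List String) :
    PySem.Set.ofList (xs.filter p) = (PySem.Set.ofList xs).filter p := by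
  induction xs with
  | nil => rfl
  | cons x xs ih =>
    by_cases hx : p x = true
    · rw [List.filter_cons_of_pos hx, PySem.Set.ofList_cons, PySem.Set.ofList_cons]
      simp only [PySem.Set.discard, ih, List.filter_cons_of_pos hx, List.filter_filter]
      congr 1
      apply List.filter_congr
      intro a _
      rw [Bool.and_comm]
    · rw [List.filter_cons_of_neg hx, PySem.Set.ofList_cons, ih]
      simp only [PySem.Set.discard, List.filter_cons_of_neg hx, List.filter_filter]
      apply List.filter_congr
      intro a _
      by_cases hax : a = x
      · subst hax; simp [hx]
      · simp [hax]

-- recursive partitioning computes exactly Counter(ks).items()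
theorem pvConta_eq_counter_items (ks : List String) :
    pvConta ks = (PySem.Set.ofList ks).map (fun k => (k, (ks.count k : Int))) := by
  suffices H : ∀ (n : Nat) (ks : List String), ks.length ≤ n →
      pvConta ks = (PySem.Set.ofList ks).map (fun k => (k, (ks.count k : Int))) from
    H ks.length ks le_rfl
  intro n
  induction n with
  | zero =>
    intro ks hks
    have : ks = [] := List.eq_nil_of_length_eq_zero (Nat.le_zero.mp hks)
    subst this
    rw [pvConta]
    rfl
  | succ n ih =>
    intro ks hks
    match ks with
    | [] => rw [pvConta]; rfl
    | c :: rest =>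
      rw [pvConta, PySem.Set.ofList_cons]
      simp only [List.map_cons, List.singleton_append, List.cons.injEq]
      refine ⟨?_, ?_⟩
      · -- head: length of the '== c' filter is count c (c :: rest)
        simp [List.count_eq_countP, List.countP_eq_length_filter]
      · -- tail
        have hlen : (rest.filter (fun k => k != c)).length ≤ n :=
          le_trans (List.length_filter_le _ _) (Nat.lt_succ_iff.mp (by simpa using hks))
        rw [ih _ hlen]
        have hres : PySem.Set.ofList (rest.filter (fun k => k != c))
            = (PySem.Set.ofList rest).filter (fun y => y != c) :=
          pvOfList_filter (fun k => k != c) rest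
        rw [hres]
        simp only [PySem.Set.discard, bne]
        apply List.map_congr_left
        intro k hk
        have hkc : (k == c) = false := by
          rcases List.mem_filter.mp hk with ⟨_, h2⟩
          simpa using h2
        have hkc' : k ≠ c := by simpa using hkc
        simp [List.count_cons, hkc]
        exact fun h => hkc' h.symm

-- ===== VERDICT (by name: the statement is the Claim_ definition above) =====
theorem distribuicaoDoencaPFaixaEtaria_spec : Claim_equal_distribuicaoDoencaPFaixaEtaria := by
  intro d _ _
  unfold Spec_distribuicaoDoencaPFaixaEtaria
  unfold distribuicaoDoencaPFaixaEtaria distribuicaoDoencaPFaixaEtaria_alt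
  cases h : (PySem.Dict.mk d).get? true with
  | none => rfl
  | some pacientes =>
    dsimp only
    rw [pvFold_eq]
    have hmap : List.foldl (fun (d : PySem.Dict String Int) p => d.insert (pvFaixa p) (d.getD (pvFaixa p) 0 + 1)) PySem.Dict.empty pacientes
        = List.foldl (fun (d : PySem.Dict String Int) k => d.insert k (d.getD k 0 + 1)) PySem.Dict.empty (pacientes.map pvFaixa) := by
      rw [List.foldl_map]
    rw [hmap, PySem.Dict.foldl_insert_getD_add_one_eq_counter, PySem.Dict.items_counter]
    -- B side: (Dict.mk pairs).items = pairs definitionally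
    show _ = pvConta (pacientes.map pvFaixa)
    rw [pvConta_eq_counter_items]
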